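-- pv_equiv track=rewrite | github.com/scholer/rsenv | rsenv/origami/oligomanager_tools/set_comparison/OmSetReader.py | getSeqHeader
-- ===== SOURCE A (Python) =====
-- def getSeqHeader(rowdict):
--     bestHeaders = ['sequence_mod', 'sequence']
--     for key in list(rowdict.keys()):
--         if key.lower() in bestHeaders:
--             return key
--     for key in list(rowdict.keys()):
--         if key.lower().find('sequence')>=0:
--             return key
--     return 0
-- ===== SOURCE B (Python) =====
-- def getSeqHeader(rowdict):
--     fallback = None
--     for key in list(rowdict.keys()):
--         k = key.lower()
--         if k in ('sequence_mod', 'sequence'):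
--             return key
--         if fallback is None and k.find('sequence') >= 0:
--             fallback = key
--     return fallback if fallback is not None else 0
-- ===== Notes on version B (the rewrite author's own statement) =====
-- stated objective: simpler
-- what changed: Replaces A's two full scans over the keys by a single pass that returns an exact match immediately and remembers the first substring match in a fallback variable.
-- outside the precondition, e.g. on getSeqHeader({'name': 'x'}): A returns 0, B returns 0
import Mathlib
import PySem

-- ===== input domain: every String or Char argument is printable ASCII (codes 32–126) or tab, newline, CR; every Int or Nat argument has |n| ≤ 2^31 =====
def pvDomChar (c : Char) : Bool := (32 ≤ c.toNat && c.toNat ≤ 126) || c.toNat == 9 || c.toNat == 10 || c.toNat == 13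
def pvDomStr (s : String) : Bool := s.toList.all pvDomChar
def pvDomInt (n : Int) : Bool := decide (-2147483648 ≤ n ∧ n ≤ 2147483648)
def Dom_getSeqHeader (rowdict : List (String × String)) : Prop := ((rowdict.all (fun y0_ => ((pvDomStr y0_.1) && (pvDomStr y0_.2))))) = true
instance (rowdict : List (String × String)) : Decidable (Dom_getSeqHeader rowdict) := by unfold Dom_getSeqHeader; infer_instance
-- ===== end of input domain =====

-- B merges A's two scans into one pass with a fallback variable (objective: simpler, one traversal).

-- ===== PORT A =====
-- key.lower() in ['sequence_mod', 'sequence']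
def pvExact (key : String) : Bool :=
  PySem.Str.lower key == "sequence_mod" || PySem.Str.lower key == "sequence"

-- key.lower().find('sequence') >= 0
def pvSub (key : String) : Bool :=
  decide (PySem.Str.find (PySem.Str.lower key) "sequence" ≥ 0)

-- first loop of A: first key whose lowercase is an exact best header
def pvLoop1 (keys : List String) : Option String :=
  match keys with
  | [] => none
  | k :: rest => if pvExact k then some k else pvLoop1 rest

-- second loop of A: first key whose lowercase contains 'sequence'
def pvLoop2 (keys : List String) : Option String :=
  match keys with
  | [] => none
  | k :: rest => if pvSub k then some k else pvLoop2 rest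

-- 'return 0' of A is outside Pre_ (0 is not a string); "" stands for that unreachable branch
def getSeqHeader (rowdict : List (String × String)) : String :=
  let keys := rowdict.map Prod.fst
  match pvLoop1 keys with
  | some k => k
  | none =>
    match pvLoop2 keys with
    | some k => k
    | none => ""

-- ===== PORT B =====
-- single pass with fallback; B's 'return 0' branch is outside Pre_ (fallback = none → "")
def pvLoopB (keys : List String) (fallback : Option String) : String :=
  match keys with
  | [] => match fallback with | some f => f | none => ""
  | key :: rest =>
    if pvExact key then key
    else if fallback.isNone && pvSub key then pvLoopB rest (some key)
    else pvLoopB rest fallback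

def getSeqHeader_alt (rowdict : List (String × String)) : String :=
  pvLoopB (rowdict.map Prod.fst) none

-- ===== PRECONDITION & SPEC =====
-- Pre_ excludes the inputs where no key contains 'sequence': there A (and B) return the int 0,
-- which is not a value of the declared string type.
def Pre_getSeqHeader (rowdict : List (String × String)) : Prop :=
  ∃ p ∈ rowdict, pvSub p.1 = true
instance (rowdict : List (String × String)) : Decidable (Pre_getSeqHeader rowdict) := by
  unfold Pre_getSeqHeader; infer_instance

def pvWitness_getSeqHeader : (List (String × String)) := [("Sequence", "ATG")]

def Spec_getSeqHeader (rowdict : List (String × String)) (out : String) : Prop := out = getSeqHeader_alt rowdict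
instance (rowdict : List (String × String)) (out : String) : Decidable (Spec_getSeqHeader rowdict out) := by unfold Spec_getSeqHeader; infer_instance

-- ===== CLAIM (what is proved, stated in full; the proofs are below) =====
def Claim_equal_getSeqHeader : Prop := ∀ (rowdict : List (String × String)), Dom_getSeqHeader rowdict → Pre_getSeqHeader rowdict → Spec_getSeqHeader rowdict (getSeqHeader rowdict)

-- ===== LEMMAS AND PROOFS =====

-- characterisation of B's loop in terms of A's two loops
theorem pvLoopB_eq (keys : List String) (fb : Option String) :
    pvLoopB keys fb =
      match pvLoop1 keys with
      | some k => k
      | none =>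
        match fb with
        | some f => f
        | none => match pvLoop2 keys with | some k => k | none => "" := by
  induction keys generalizing fb with
  | nil => cases fb <;> simp [pvLoopB, pvLoop1, pvLoop2]
  | cons k rest ih =>
    by_cases hx : pvExact k
    · simp [pvLoopB, pvLoop1, hx]
    · cases fb with
      | some f => simp [pvLoopB, pvLoop1, hx, ih]
      | none =>
        by_cases hs : pvSub k
        · simp [pvLoopB, pvLoop1, pvLoop2, hx, hs, ih]
        · simp [pvLoopB, pvLoop1, pvLoop2, hx, hs, ih]

-- ===== VERDICT (by name: the statement is the Claim_ definition above) =====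
theorem getSeqHeader_spec : Claim_equal_getSeqHeader := by
  intro rowdict _ _
  unfold Spec_getSeqHeader getSeqHeader getSeqHeader_alt
  rw [pvLoopB_eq]
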